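-- pv_equiv track=rewrite | github.com/dkryoo/-Coex | simulation/mms/stack_smoke_check.py | _split_blocks_by_config_debug
-- ===== SOURCE A (Python) =====
-- from typing import Dict, List, Optional, Tuple
--
-- def _split_blocks_by_config_debug(stdout: str) -> List[str]:
--     """
--     full_stack_mms_demo.py 출력은 케이스마다 [MMS config debug]가 등장.
--     이걸 기준으로 블록을 나누면 케이스별 파싱이 쉬움.
--     """
--     marker = "[MMS config debug]"
--     if marker not in stdout:
--         # fallback: case 헤더 기준 split
--         return [stdout]
--
--     parts = stdout.split(marker)
--     blocks: List[str] = []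
--     # 첫 파트는 preamble
--     preamble = parts[0]
--     for rest in parts[1:]:
--         blocks.append(marker + rest)
--
--     # preamble이 케이스 1의 일부일 수 있어 blocks[0] 앞에 붙여줌
--     if blocks:
--         blocks[0] = preamble + blocks[0]
--     else:
--         blocks = [stdout]
--     return blocks
-- ===== SOURCE B (Python) =====
-- def _split_blocks_by_config_debug(stdout):
--     """Positional scan: slice the string at marker occurrences instead of
--     split-and-reassemble; the first block keeps the preamble."""
--     marker = "[MMS config debug]"
--     p0 = stdout.find(marker)
--     if p0 == -1:
--         return [stdout]
--     blocks = []
--     start = 0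
--     cur = p0
--     while True:
--         nxt = stdout.find(marker, cur + len(marker))
--         if nxt == -1:
--             blocks.append(stdout[start:])
--             return blocks
--         blocks.append(stdout[start:nxt])
--         start = nxt
--         cur = nxt
-- ===== Notes on version B (the rewrite author's own statement) =====
-- stated objective: alternative
-- what changed: Replaces split-then-reassemble (split by marker, re-prefix the marker onto each part, then glue the preamble onto the first block) with a single positional scan: str.find locates each marker occurrence and blocks are emitted directly as slices of the original string, the first slice starting at 0.
import Mathlib
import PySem

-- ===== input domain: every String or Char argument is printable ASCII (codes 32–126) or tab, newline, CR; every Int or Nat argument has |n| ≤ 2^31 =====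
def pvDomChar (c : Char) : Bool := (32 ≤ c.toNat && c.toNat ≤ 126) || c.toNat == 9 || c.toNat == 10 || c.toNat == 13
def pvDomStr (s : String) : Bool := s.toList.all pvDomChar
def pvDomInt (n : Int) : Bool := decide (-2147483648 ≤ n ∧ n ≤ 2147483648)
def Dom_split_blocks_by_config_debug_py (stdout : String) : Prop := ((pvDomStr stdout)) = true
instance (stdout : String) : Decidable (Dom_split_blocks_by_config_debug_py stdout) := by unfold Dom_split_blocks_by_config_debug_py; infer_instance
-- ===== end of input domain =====

-- B replaces A's split-then-reassemble with a positional scan that emits blocks as slices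
-- of the original string (alternative decomposition, same cost); return values proved equal.


-- ===== PORT A =====
-- A splits stdout by the marker and re-assembles: marker re-prefixed onto each part,
-- preamble glued onto the first block.  (Chars-level, wrapped by String.ofList as the
-- PySem.Str wrappers do; `stdout.split(marker)` with the nonempty literal marker is
-- PySem.Chars.splitOn on the char lists.)
def split_blocks_by_config_debug_py (stdout : String) : List String :=
  let marker := "[MMS config debug]"
  if ¬ PySem.Str.isIn marker stdout then [stdout]
  else
    let parts := PySem.Chars.splitOn stdout.toList marker.toList
    let preamble := parts.headD []          -- parts[0]; parts is never empty
    let blocks := (parts.drop 1).map (fun rest => marker.toList ++ rest)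
    match blocks with
    | [] => [stdout]
    | b0 :: bs => ((preamble ++ b0) :: bs).map String.ofList

-- ===== PORT B =====
-- B scans positions: each iteration finds the next marker occurrence after cur and
-- emits the slice stdout[start:nxt]; the final block is stdout[start:].
-- fuel = len(stdout)+1 bounds the loop (each step advances cur by ≥ len(marker) ≥ 1).
def pvBGo (m s : List Char) : Nat → Int → Int → List (List Char)
  | 0, _, _ => []    -- never reached with fuel > len(s) - cur
  | fuel + 1, start, cur =>
    let nxt := PySem.Chars.findFrom s m (cur + (m.length : Int)) none
    if nxt = -1 then [PySem.Chars.slice s (some start) none]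
    else PySem.Chars.slice s (some start) (some nxt) :: pvBGo m s fuel nxt nxt

def split_blocks_by_config_debug_py_alt (stdout : String) : List String :=
  let marker := "[MMS config debug]"
  let p0 := PySem.Str.find stdout marker
  if p0 = -1 then [stdout]
  else (pvBGo marker.toList stdout.toList (stdout.toList.length + 1) 0 p0).map String.ofList

-- ===== PRECONDITION & SPEC =====
def Spec_split_blocks_by_config_debug_py (stdout : String) (out : List String) : Prop := out = split_blocks_by_config_debug_py_alt stdout
instance (stdout : String) (out : List String) : Decidable (Spec_split_blocks_by_config_debug_py stdout out) := by unfold Spec_split_blocks_by_config_debug_py; infer_instance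

-- ===== CLAIM (what is proved, stated in full; the proofs are below) =====
def Claim_equal_split_blocks_by_config_debug_py : Prop := ∀ (stdout : String), Dom_split_blocks_by_config_debug_py stdout → Spec_split_blocks_by_config_debug_py stdout (split_blocks_by_config_debug_py stdout)

-- ===== LEMMAS AND PROOFS =====

-- find of a list that m is a prefix of is 0
theorem pvFindOfPrefix (m l : List Char) (h : m <+: l) : PySem.Chars.find l m = 0 := by
  cases l with
  | nil =>
    have : m = [] := List.prefix_nil.mp h
    simp [PySem.Chars.find, PySem.Chars.find.go, this]
  | cons c rest =>
    have : m.isPrefixOf (c :: rest) = true := List.isPrefixOf_iff_prefix.mpr h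
    simp [PySem.Chars.find, PySem.Chars.find.go, this]

-- stepping find over one non-matching head character
theorem pvFindCons (m : List Char) (c : Char) (rest : List Char)
    (hnp : ¬ m <+: (c :: rest)) (hinf : m <:+: rest) :
    PySem.Chars.find (c :: rest) m = PySem.Chars.find rest m + 1 := by
  have hinfl : m <:+: (c :: rest) := List.infix_cons_iff.mpr (Or.inr hinf)
  have hf : 0 ≤ PySem.Chars.find (c :: rest) m := (PySem.Chars.find_nonneg_iff _ _).mpr hinfl
  have hg : 0 ≤ PySem.Chars.find rest m := (PySem.Chars.find_nonneg_iff _ _).mpr hinf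
  obtain ⟨hf1, hf2⟩ := PySem.Chars.find_spec hf
  obtain ⟨hg1, hg2⟩ := PySem.Chars.find_spec hg
  set F := (PySem.Chars.find (c :: rest) m).toNat with hF
  set G := (PySem.Chars.find rest m).toNat with hG
  have hFG : F = G + 1 := by
    have hFne : F ≠ 0 := by
      intro h0
      rw [h0] at hf1; simp at hf1; exact hnp hf1
    have hle : F ≤ G + 1 := by
      by_contra hlt
      have := hf2 (G + 1) (Nat.lt_of_not_le hlt)
      rw [List.drop_succ_cons] at this
      exact this hg1
    have hge : G + 1 ≤ F := by
      by_contra hlt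
      have hlt : F < G + 1 := Nat.lt_of_not_le hlt
      -- F ≤ G, F ≠ 0, so F = j+1 with j < G
      obtain ⟨j, hjF⟩ : ∃ j, F = j + 1 := ⟨F - 1, by omega⟩
      have hj : j < G := by omega
      have := hg2 j hj
      rw [hjF, List.drop_succ_cons] at hf1
      exact this hf1
    omega
  omega

-- splitOn.go never returns the empty list
theorem pvGoNe (m : List Char) : ∀ (fuel : Nat) (l cur : List Char) (acc : List (List Char)),
    PySem.Chars.splitOn.go m fuel l cur acc ≠ [] := by
  intro fuel
  induction fuel with
  | zero => intro l cur acc; simp [PySem.Chars.splitOn.go]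
  | succ f ih =>
    intro l cur acc
    cases l with
    | nil => simp [PySem.Chars.splitOn.go]
    | cons c rest =>
      rw [PySem.Chars.splitOn.go]
      split
      · exact ih _ _ _
      · exact ih _ _ _

theorem pvSplitOnNe (l m : List Char) : PySem.Chars.splitOn l m ≠ [] := by
  unfold PySem.Chars.splitOn
  exact pvGoNe m _ l [] []

-- full characterisation of splitOn.go by the first occurrence
theorem pvC (m : List Char) (hm : m ≠ []) : ∀ (n : Nat) (l : List Char), l.length ≤ n →
    ∀ (fuel : Nat), l.length ≤ fuel → ∀ (cur : List Char) (acc : List (List Char)),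
    PySem.Chars.splitOn.go m fuel l cur acc =
      if m <:+: l then
        acc.reverse ++ ((cur.reverse ++ l.take (PySem.Chars.find l m).toNat) ::
          PySem.Chars.splitOn (l.drop ((PySem.Chars.find l m).toNat + m.length)) m)
      else acc.reverse ++ [cur.reverse ++ l] := by
  intro n
  induction n with
  | zero =>
    intro l hl fuel hfuel cur acc
    have : l = [] := List.eq_nil_of_length_eq_zero (by omega)
    subst this
    have : ¬ m <:+: ([] : List Char) := by
      simp [List.infix_nil]; exact hm
    rw [if_neg this]
    cases fuel with
    | zero => simp [PySem.Chars.splitOn.go]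
    | succ f => simp [PySem.Chars.splitOn.go]
  | succ n ih =>
    intro l hl fuel hfuel cur acc
    cases l with
    | nil =>
      have : ¬ m <:+: ([] : List Char) := by simp [List.infix_nil]; exact hm
      rw [if_neg this]
      cases fuel with
      | zero => simp [PySem.Chars.splitOn.go]
      | succ f => simp [PySem.Chars.splitOn.go]
    | cons c rest =>
      cases fuel with
      | zero => simp at hfuel
      | succ f =>
      rw [PySem.Chars.splitOn.go]
      by_cases hp : m <+: (c :: rest)
      · rw [if_pos (List.isPrefixOf_iff_prefix.mpr hp)]
        have hinf : m <:+: (c :: rest) := hp.isInfix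
        rw [if_pos hinf]
        have hfind : PySem.Chars.find (c :: rest) m = 0 := pvFindOfPrefix m _ hp
        rw [hfind]
        simp only [Int.toNat_zero, List.take_zero, List.append_nil, Nat.zero_add]
        -- goal: go m f (drop m.length (c::rest)) [] (cur.reverse :: acc) = acc.reverse ++ (cur.reverse :: splitOn (drop m.length (c::rest)) m)
        have hlen : (List.drop m.length (c :: rest)).length ≤ n := by
          have hm1 : 1 ≤ m.length := by
            cases m with | nil => simp at hm | cons a b => simp
          simp only [List.length_drop, List.length_cons] at *
          omega
        have hfuel' : (List.drop m.length (c :: rest)).length ≤ f := by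
          have hm1 : 1 ≤ m.length := by
            cases m with | nil => simp at hm | cons a b => simp
          simp only [List.length_drop, List.length_cons] at *
          omega
        rw [ih _ hlen f hfuel' [] (cur.reverse :: acc)]
        have h2 := ih (List.drop m.length (c :: rest)) hlen
          ((List.drop m.length (c :: rest)).length + 1) (by omega) [] []
        have hsplit : PySem.Chars.splitOn (List.drop m.length (c :: rest)) m =
            PySem.Chars.splitOn.go m ((List.drop m.length (c :: rest)).length + 1)
              (List.drop m.length (c :: rest)) [] [] := rfl
        rw [hsplit, h2]
        split <;> simp
      · rw [if_neg (by simpa [List.isPrefixOf_iff_prefix] using hp)]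
        have hlen : rest.length ≤ n := by simp at hl; omega
        have hfuel' : rest.length ≤ f := by simp at hfuel; omega
        rw [ih rest hlen f hfuel' (c :: cur) acc]
        by_cases hinf : m <:+: rest
        · rw [if_pos hinf, if_pos (List.infix_cons_iff.mpr (Or.inr hinf))]
          rw [pvFindCons m c rest hp hinf]
          have hg : 0 ≤ PySem.Chars.find rest m := (PySem.Chars.find_nonneg_iff _ _).mpr hinf
          have htn : (PySem.Chars.find rest m + 1).toNat = (PySem.Chars.find rest m).toNat + 1 := by omega
          rw [htn]
          have hidx : (PySem.Chars.find rest m).toNat + 1 + m.length =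
              ((PySem.Chars.find rest m).toNat + m.length) + 1 := by omega
          rw [hidx, List.drop_succ_cons]
          simp [List.take_succ_cons]
        · rw [if_neg hinf, if_neg (by
            intro h
            rcases List.infix_cons_iff.mp h with h' | h'
            · exact hp h'
            · exact hinf h')]
          simp

theorem pvS1 (m l : List Char) (hm : m ≠ []) (h : ¬ m <:+: l) :
    PySem.Chars.splitOn l m = [l] := by
  unfold PySem.Chars.splitOn
  rw [pvC m hm l.length l le_rfl (l.length + 1) (by omega) [] []]
  rw [if_neg h]; simp

theorem pvS2 (m l : List Char) (hm : m ≠ []) (h : m <:+: l) :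
    PySem.Chars.splitOn l m =
      l.take (PySem.Chars.find l m).toNat ::
        PySem.Chars.splitOn (l.drop ((PySem.Chars.find l m).toNat + m.length)) m := by
  conv_lhs => rw [show PySem.Chars.splitOn l m = PySem.Chars.splitOn.go m (l.length + 1) l [] [] from rfl]
  rw [pvC m hm l.length l le_rfl (l.length + 1) (by omega) [] []]
  rw [if_pos h]; simp

-- the invariant of B's scanning loop, against A's splitOn decomposition
theorem pvM (m s : List Char) (hm : m ≠ []) : ∀ (fuel : Nat) (start cur : Int),
    0 ≤ start → start ≤ cur → m <+: s.drop cur.toNat →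
    s.length + 1 - cur.toNat ≤ fuel →
    pvBGo m s fuel start cur =
      ((s.drop start.toNat).take (cur.toNat + m.length - start.toNat) ++
        (PySem.Chars.splitOn (s.drop (cur.toNat + m.length)) m).headD []) ::
      ((PySem.Chars.splitOn (s.drop (cur.toNat + m.length)) m).tail).map (fun q => m ++ q) := by
  intro fuel
  induction fuel with
  | zero =>
    intro start cur hs hsc hocc hfuel
    -- cur.toNat ≤ s.length so the bound is impossible
    exfalso
    have hm1 : 1 ≤ m.length := by cases m with | nil => simp at hm | cons a b => simp
    have h1 : m.length ≤ (s.drop cur.toNat).length := hocc.length_le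
    simp only [List.length_drop] at h1
    omega
  | succ f ih =>
    intro start cur hs hsc hocc hfuel
    have hm1 : 1 ≤ m.length := by cases m with | nil => simp at hm | cons a b => simp
    have h1 : m.length ≤ (s.drop cur.toNat).length := hocc.length_le
    simp only [List.length_drop] at h1
    have hcs : cur.toNat < s.length := by omega
    have hkle : cur.toNat + m.length ≤ s.length := by omega
    have hc0 : 0 ≤ cur := le_trans hs hsc
    have hstc : start.toNat ≤ cur.toNat := Int.toNat_le_toNat hsc
    -- the scanned argument cur + m.length is the Nat cast of cur.toNat + m.length
    have hcast : cur + (m.length : Int) = ((cur.toNat + m.length : Nat) : Int) := by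
      push_cast; omega
    rw [pvBGo, hcast, PySem.Chars.findFrom_natCast s m (cur.toNat + m.length) hkle]
    set r := List.drop (cur.toNat + m.length) s with hr
    by_cases hfr : PySem.Chars.find r m = -1
    · rw [if_pos hfr]
      rw [if_pos rfl]
      have hninf : ¬ m <:+: r := (PySem.Chars.find_eq_neg_one_iff r m).mp hfr
      rw [pvS1 m r hm hninf]
      simp only [List.headD_cons, List.tail_cons, List.map_nil]
      rw [PySem.Chars.slice_eq_listSlice, PySem.List.slice_from s hs]
      -- s.drop start = take (cur+L-start) (s.drop start) ++ r
      have hba : start.toNat + (cur.toNat + m.length - start.toNat) = cur.toNat + m.length := by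
        omega
      have hthis : List.drop (cur.toNat + m.length - start.toNat) (List.drop start.toNat s) = r := by
        rw [List.drop_drop, hba, hr]
      rw [← hthis, List.take_append_drop]
    · rw [if_neg hfr]
      have hp : 0 ≤ PySem.Chars.find r m := by
        have := PySem.Chars.neg_one_le_find r m
        omega
      have hne : ¬ ((cur.toNat + m.length : Nat) : Int) + PySem.Chars.find r m = -1 := by
        push_cast; omega
      rw [if_neg hne]
      set p := PySem.Chars.find r m with hpdef
      set nxt : Int := ((cur.toNat + m.length : Nat) : Int) + p with hnxt
      have hnxt0 : 0 ≤ nxt := by positivity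
      have hnxtn : nxt.toNat = cur.toNat + m.length + p.toNat := by omega
      -- occurrence at nxt
      have hocc' : m <+: List.drop nxt.toNat s := by
        have := (PySem.Chars.find_spec (s := r) (sub := m) hp).1
        rw [hr] at this
        rw [List.drop_drop] at this
        rw [hnxtn]
        exact this
      have hfuel' : s.length + 1 - nxt.toNat ≤ f := by rw [hnxtn]; omega
      rw [ih nxt nxt hnxt0 le_rfl hocc' hfuel']
      -- splitOn r m = r.take p.toNat :: splitOn (r.drop (p.toNat + m.length)) m
      have hinf : m <:+: r := by
        have := (PySem.Chars.find_nonneg_iff r m).mp hp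
        exact this
      rw [pvS2 m r hm hinf, ← hpdef]
      obtain ⟨q, qs, hqs⟩ : ∃ q qs, PySem.Chars.splitOn (r.drop (p.toNat + m.length)) m = q :: qs := by
        rcases hx : PySem.Chars.splitOn (r.drop (p.toNat + m.length)) m with _ | ⟨q, qs⟩
        · exact absurd hx (pvSplitOnNe _ m)
        · exact ⟨q, qs, rfl⟩
      have hdropnxt : List.drop (nxt.toNat + m.length) s = r.drop (p.toNat + m.length) := by
        have hba : cur.toNat + m.length + (p.toNat + m.length) = nxt.toNat + m.length := by
          rw [hnxtn]; omega
        rw [hr, List.drop_drop, hba]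
      rw [hdropnxt, hqs]
      simp only [List.headD_cons, List.tail_cons, List.map_cons]
      congr 1
      · -- slice s start nxt = take (cur+L-start) (drop start s) ++ r.take p.toNat
        rw [PySem.Chars.slice_eq_listSlice, PySem.List.slice_toNat s hs hnxt0]
        have harith : nxt.toNat - start.toNat =
            (cur.toNat + m.length - start.toNat) + p.toNat := by rw [hnxtn]; omega
        rw [harith, List.take_add]
        have hba : start.toNat + (cur.toNat + m.length - start.toNat) = cur.toNat + m.length := by
          omega
        rw [List.drop_drop, hba, hr]
      · -- head: (drop nxt s).take (nxt+L-nxt) = m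
        have h2 : nxt.toNat + m.length - nxt.toNat = m.length := by omega
        rw [h2, ← List.prefix_iff_eq_take.mp hocc']


theorem pvMain (stdout : String) :
    split_blocks_by_config_debug_py stdout = split_blocks_by_config_debug_py_alt stdout := by
  unfold split_blocks_by_config_debug_py split_blocks_by_config_debug_py_alt
  simp only [PySem.Str.isIn_eq, PySem.Str.find_eq]
  have hm : "[MMS config debug]".toList ≠ [] := by decide
  have hm1 : 1 ≤ "[MMS config debug]".toList.length := by decide
  by_cases hinf : "[MMS config debug]".toList <:+: stdout.toList
  · -- marker present
    have hInC : PySem.Chars.isIn "[MMS config debug]".toList stdout.toList = true :=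
      (PySem.Chars.isIn_iff_infix _ _).mpr hinf
    have hp0 : 0 ≤ PySem.Chars.find stdout.toList "[MMS config debug]".toList :=
      (PySem.Chars.find_nonneg_iff _ _).mpr hinf
    rw [if_neg (not_not_intro hInC), if_neg (by omega)]
    set s := stdout.toList with hsdef
    set m := "[MMS config debug]".toList with hmdef
    set p0 := PySem.Chars.find s m with hp0def
    have hocc : m <+: List.drop p0.toNat s := (PySem.Chars.find_spec hp0).1
    have hB := pvM m s hm (s.length + 1) 0 p0 le_rfl hp0 hocc (by omega)
    have hA := pvS2 m s hm hinf
    obtain ⟨q, qs, hqs⟩ :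
        ∃ q qs, PySem.Chars.splitOn (s.drop (p0.toNat + m.length)) m = q :: qs := by
      rcases hx : PySem.Chars.splitOn (s.drop (p0.toNat + m.length)) m with _ | ⟨q, qs⟩
      · exact absurd hx (pvSplitOnNe _ m)
      · exact ⟨q, qs, rfl⟩
    rw [← hp0def] at hA
    rw [hqs] at hA hB
    simp only [Int.toNat_zero, List.drop_zero, Nat.sub_zero, List.headD_cons,
      List.tail_cons] at hB
    rw [hB, hA]
    simp only [List.headD_cons, List.drop_succ_cons, List.drop_zero, List.map_cons]
    congr 2
    have htk : List.take (p0.toNat + m.length) s = List.take p0.toNat s ++ m := by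
      rw [List.take_add, ← List.prefix_iff_eq_take.mp hocc]
    rw [htk, List.append_assoc]
  · -- marker absent: both return [stdout]
    have hInC : PySem.Chars.isIn "[MMS config debug]".toList stdout.toList = false :=
      (PySem.Chars.isIn_eq_false_iff _ _).mpr hinf
    have hF : PySem.Chars.find stdout.toList "[MMS config debug]".toList = -1 :=
      (PySem.Chars.find_eq_neg_one_iff _ _).mpr hinf
    rw [if_pos (by rw [hInC]; exact Bool.false_ne_true), if_pos hF]


-- ===== VERDICT (by name: the statement is the Claim_ definition above) =====
theorem split_blocks_by_config_debug_py_spec : Claim_equal_split_blocks_by_config_debug_py := by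
  intro stdout _
  unfold Spec_split_blocks_by_config_debug_py
  exact pvMain stdout
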